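-- pv_equiv track=rewrite | github.com/ringthebel/neural_network_step2step | sentiment.py | k_gram
-- ===== SOURCE A (Python) =====
-- def k_gram(clean_data, k):
--     array_k_folder = []
--
--     for i in range(len(clean_data)):
--         new_row = []
--         # for j in range(len(array_1_folder[i]))[0:(len(array_1_folder[i])):k]:
--         for j in range(len(clean_data[i])-k+1):
--             mul_word = clean_data[i][j:(j+k)]
--             new_mul_word = '_'.join(mul_word)
--             new_row.append(new_mul_word)
--         array_k_folder.append(new_row)
--     return array_k_folder
-- ===== SOURCE B (Python) =====
-- def k_gram(clean_data, k):
--     # For each row, zip offset views of the row (never more than len(row)+1 of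
--     # them are needed) and '_'-join each zipped tuple into one k-gram.
--     return [['_'.join(t)
--              for t in zip(*(row[i:] for i in range(min(k, len(row) + 1))))]
--             for row in clean_data]
-- ===== Notes on version B (the rewrite author's own statement) =====
-- stated objective: idiomatic
-- what changed: Replaces the explicit index loop over j with a zip of k offset views of each row (row[0:], row[1:], ..., row[k-1:]), joining each zipped tuple; the slice-per-index inner loop disappears.
-- outside the precondition, e.g. on k_gram([['a', 'b']], 0): A returns [['', '', '']], B returns [[]]; on k_gram([['a']], -1): A returns [['', '', '']], B returns [[]]
import Mathlib
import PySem

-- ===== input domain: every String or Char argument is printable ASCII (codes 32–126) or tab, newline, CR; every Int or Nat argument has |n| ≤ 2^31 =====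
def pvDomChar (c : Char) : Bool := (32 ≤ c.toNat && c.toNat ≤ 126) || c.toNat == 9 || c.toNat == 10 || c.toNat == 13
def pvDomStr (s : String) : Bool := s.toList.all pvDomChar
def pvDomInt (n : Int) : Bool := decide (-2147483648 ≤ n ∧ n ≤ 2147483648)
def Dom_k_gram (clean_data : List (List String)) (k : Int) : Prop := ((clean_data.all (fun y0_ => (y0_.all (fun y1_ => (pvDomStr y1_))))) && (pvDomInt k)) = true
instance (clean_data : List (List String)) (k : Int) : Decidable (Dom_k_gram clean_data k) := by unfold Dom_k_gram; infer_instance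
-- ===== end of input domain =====

-- B builds each row's k-grams by zipping k offset views of the row instead of slicing at each index (idiomatic; same cost).

-- ===== PORT A =====
def k_gram (clean_data : List (List String)) (k : Int) : List (List String) :=
  (PySem.List.pyRange 0 (PySem.List.len clean_data) 1).foldl (fun array_k_folder i =>
    let row := PySem.List.pyGetD clean_data i []
    let new_row := (PySem.List.pyRange 0 (PySem.List.len row - k + 1) 1).foldl (fun new_row j =>
      let mul_word := PySem.List.slice row (some j) (some (j + k))
      let new_mul_word := PySem.Str.join "_" mul_word
      new_row ++ [new_mul_word]) []
    array_k_folder ++ [new_row]) []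

-- ===== PORT B =====
-- zip(*lists) in Source B: stops at the first exhausted list; zip() with no arguments is empty.
def pvZipAll (ls : List (List String)) : List (List String) :=
  match ls with
  | [] => []
  | l :: rest =>
    match l with
    | [] => []
    | x :: xs =>
      if rest.all (fun r => !r.isEmpty) then
        (x :: rest.map (fun r => r.headD "")) ::
          pvZipAll (xs :: rest.map (fun r => r.tail))
      else []
termination_by (ls.headD []).length
decreasing_by simp

def k_gram_alt (clean_data : List (List String)) (k : Int) : List (List String) :=
  clean_data.map (fun row =>
    (pvZipAll ((PySem.List.pyRange 0 (min k (PySem.List.len row + 1)) 1).map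
        (fun i => PySem.List.slice row (some i) none))).map
      (fun t => PySem.Str.join "_" t))

-- ===== PRECONDITION & SPEC =====
-- Pre_ excludes k ≤ 0, on which the row of len(row)-k+1 empty '_'-joins A emits is an artefact of
-- its slice arithmetic on a corner no caller specifies; B's zip of no/negative views naturally yields empty rows there.
def Pre_k_gram (clean_data : List (List String)) (k : Int) : Prop := 1 ≤ k
instance (clean_data : List (List String)) (k : Int) : Decidable (Pre_k_gram clean_data k) := by unfold Pre_k_gram; infer_instance

def pvWitness_k_gram : List (List String) × Int := ([["a", "b", "c"], ["x"]], 2)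

def Spec_k_gram (clean_data : List (List String)) (k : Int) (out : List (List String)) : Prop := out = k_gram_alt clean_data k
instance (clean_data : List (List String)) (k : Int) (out : List (List String)) : Decidable (Spec_k_gram clean_data k out) := by unfold Spec_k_gram; infer_instance

-- ===== CLAIM (what is proved, stated in full; the proofs are below) =====
def Claim_equal_k_gram : Prop := ∀ (clean_data : List (List String)) (k : Int), Dom_k_gram clean_data k → Pre_k_gram clean_data k → Spec_k_gram clean_data k (k_gram clean_data k)

-- ===== LEMMAS AND PROOFS =====
-- canonical form both rows reduce to: the list of all contiguous k'-windows of row (k' ≥ 1)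
def pvWindows (k' : Nat) (row : List String) : List (List String) :=
  if row.length < k' then []
  else
    match row with
    | [] => []
    | _ :: rest => row.take k' :: pvWindows k' rest
termination_by row.length

lemma pvZipAll_nil_cons (rest : List (List String)) : pvZipAll ([] :: rest) = [] := by
  rw [pvZipAll.eq_def]

lemma pvZipAll_cons_cons (x : String) (xs : List String) (rest : List (List String)) :
    pvZipAll ((x :: xs) :: rest) =
      if rest.all (fun r => !r.isEmpty) then
        (x :: rest.map (fun r => r.headD "")) ::
          pvZipAll (xs :: rest.map (fun r => r.tail))
      else [] := by
  rw [pvZipAll.eq_def]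

lemma pvWindows_of_lt {k' : Nat} {row : List String} (h : row.length < k') :
    pvWindows k' row = [] := by
  rw [pvWindows.eq_def]; rw [if_pos h]

lemma pvWindows_cons_of_le {k' : Nat} {x : String} {rest : List String}
    (h : k' ≤ rest.length + 1) :
    pvWindows k' (x :: rest) = (x :: rest).take k' :: pvWindows k' rest := by
  rw [pvWindows.eq_def]
  rw [if_neg (by simp; omega)]

lemma a_row_eq (m : Nat) (row : List String) :
    (List.range ((row.length : Int) - ((m + 1 : Nat) : Int) + 1).toNat).map
      (fun j => (row.drop j).take (m + 1)) = pvWindows (m + 1) row := by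
  induction row with
  | nil =>
    rw [pvWindows_of_lt (by simp)]
    simp only [List.map_eq_nil_iff, List.range_eq_nil]
    simp
  | cons x rest ih =>
    by_cases h : (x :: rest).length < m + 1
    · rw [pvWindows_of_lt h]
      simp only [List.map_eq_nil_iff, List.range_eq_nil]
      simp at h ⊢; omega
    · rw [Nat.not_lt] at h
      rw [pvWindows_cons_of_le (by simpa using h)]
      have hlen : (((x :: rest).length : Int) - ((m + 1 : Nat) : Int) + 1).toNat
          = ((rest.length : Int) - ((m + 1 : Nat) : Int) + 1).toNat + 1 := by
        simp at h ⊢; omega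
      rw [hlen, List.range_succ_eq_map, List.map_cons, List.map_map]
      simp only [List.drop_zero]
      refine congrArg₂ List.cons rfl ?_
      rw [← ih]
      apply List.map_congr_left
      intro j _
      simp [List.drop_succ_cons]

lemma zip_tails_eq (m : Nat) (row : List String) :
    pvZipAll ((List.range (m + 1)).map (fun i => row.drop i)) = pvWindows (m + 1) row := by
  induction row with
  | nil =>
    rw [pvWindows_of_lt (by simp)]
    rw [List.range_succ_eq_map, List.map_cons]
    simp [pvZipAll_nil_cons]
  | cons x rest ih =>
    rw [List.range_succ_eq_map, List.map_cons]
    simp only [List.drop_zero, List.map_map]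
    rw [pvZipAll_cons_cons]
    by_cases h : rest.length + 1 < m + 1
    · rw [pvWindows_of_lt (by simpa using h)]
      have hbad : ¬ ((List.range m).map ((fun i => (x :: rest).drop (i + 1)))).all
          (fun r => !r.isEmpty) = true := by
        simp only [List.all_map, List.all_eq_true, Function.comp]
        intro hall
        have := hall rest.length (by simp at h ⊢; omega)
        simp [List.drop_succ_cons, List.drop_eq_nil_of_le (le_refl rest.length)] at this
      rw [if_neg (by simpa using hbad)]
    · rw [Nat.not_lt] at h
      have hm : m ≤ rest.length := by omega
      rw [pvWindows_cons_of_le (by omega)]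
      have hgood : ((List.range m).map ((fun i => (x :: rest).drop (i + 1)))).all
          (fun r => !r.isEmpty) = true := by
        simp only [List.all_map, List.all_eq_true, Function.comp]
        intro i hi
        simp only [List.mem_range] at hi
        simp [List.drop_succ_cons, List.drop_eq_nil_iff]
        omega
      rw [if_pos (by simpa using hgood)]
      refine congrArg₂ List.cons ?_ ?_
      · rw [List.map_map]
        have htake : (x :: rest).take (m + 1) = x :: rest.take m := rfl
        rw [htake]
        refine congrArg₂ List.cons rfl ?_
        apply List.ext_getElem
        · simp [hm]
        · intro i h1 h2
          simp only [List.getElem_map, List.getElem_range, List.getElem_take,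
            Function.comp, Nat.succ_eq_add_one, List.drop_succ_cons]
          rw [List.drop_eq_getElem_cons (by simp at h1; omega)]
          rfl
      · rw [List.map_map]
        have harg : rest :: (List.range m).map ((fun r => r.tail) ∘ (fun i => (x :: rest).drop i) ∘ Nat.succ)
            = (List.range (m + 1)).map (fun i => rest.drop i) := by
          rw [List.range_succ_eq_map, List.map_cons, List.map_map]
          refine congrArg₂ List.cons rfl ?_
          apply List.map_congr_left
          intro i _
          simp [Function.comp, List.drop_succ_cons]
        rw [harg, ih]

lemma zip_tails_min_eq (m : Nat) (row : List String) :
    pvZipAll ((List.range (min (m + 1) (row.length + 1))).map (fun i => row.drop i))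
      = pvWindows (m + 1) row := by
  by_cases h : m + 1 ≤ row.length + 1
  · rw [min_eq_left h]; exact zip_tails_eq m row
  · rw [min_eq_right (by omega), zip_tails_eq row.length row,
      pvWindows_of_lt (by omega), pvWindows_of_lt (by omega)]

lemma pv_main (clean_data : List (List String)) (k : Int) (hk : 1 ≤ k) :
    k_gram clean_data k = k_gram_alt clean_data k := by
  obtain ⟨m, rfl⟩ : ∃ m : Nat, k = ((m + 1 : Nat) : Int) :=
    ⟨(k - 1).toNat, by omega⟩
  unfold k_gram k_gram_alt
  rw [PySem.List.foldl_pyRange_zero_pyGetD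
    (f := fun acc row => acc ++ [(PySem.List.pyRange 0 (PySem.List.len row - ((m+1:Nat):Int) + 1) 1).foldl (fun nr j =>
      nr ++ [PySem.Str.join "_" (PySem.List.slice row (some j) (some (j + ((m+1:Nat):Int))))]) []])]
  rw [PySem.List.foldl_append_singleton_eq_map]
  apply List.map_congr_left
  intro row _
  rw [PySem.List.foldl_append_singleton_eq_map]
  have hA : (PySem.List.pyRange 0 (PySem.List.len row - ((m+1:Nat):Int) + 1) 1).map
      (fun j => PySem.Str.join "_" (PySem.List.slice row (some j) (some (j + ((m+1:Nat):Int)))))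
      = (pvWindows (m+1) row).map (fun t => PySem.Str.join "_" t) := by
    rw [← a_row_eq m row, List.map_map]
    rw [PySem.List.pyRange_one, PySem.List.len_eq, List.map_map]
    simp only [Int.sub_zero]
    apply List.map_congr_left
    intro j _
    simp only [Function.comp, zero_add]
    rw [PySem.List.slice_natCast_add]
  have hB : (pvZipAll ((PySem.List.pyRange 0 (min ((m+1:Nat):Int) (PySem.List.len row + 1)) 1).map
        (fun i => PySem.List.slice row (some i) none))).map (fun t => PySem.Str.join "_" t)
      = (pvWindows (m+1) row).map (fun t => PySem.Str.join "_" t) := by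
    rw [← zip_tails_min_eq m row]
    congr 2
    have hmin : (min ((m+1:Nat):Int) (PySem.List.len row + 1))
        = ((min (m + 1) (row.length + 1) : Nat) : Int) := by
      rw [PySem.List.len_eq]; push_cast; omega
    rw [hmin, PySem.List.pyRange_one, List.map_map]
    apply List.map_congr_left
    intro i _
    simp only [Function.comp, zero_add]
    rw [PySem.List.slice_from_natCast]
  rw [hA, hB, List.nil_append]

-- ===== VERDICT (by name: the statement is the Claim_ definition above) =====
theorem k_gram_spec : Claim_equal_k_gram := by
  intro clean_data k _ hpre
  exact pv_main clean_data k hpre
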